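-- pv_equiv track=rewrite | github.com/hhenrichsen/advent-of-code-2025 | python/day01.py | part1
-- ===== SOURCE A (Python) =====
-- def part1(inp):
--     sum = 0
--     left = []
--     right = []
--     ct = 50
--     for line in inp:
--         first = line[0]
--         rest = int(line[1:])
--         if first == "L":
--             ct -= rest
--         else:
--             ct += rest
--         if ct % 100 == 0:
--             sum += 1
--     return sum
-- ===== SOURCE B (Python) =====
-- def part1(inp):
--     # Divide and conquer: solve(lines, start) returns (count of positions that are
--     # multiples of 100 while walking lines from position start, total displacement).
--     def solve(lines, start):
--         if not lines:
--             return (0, 0)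
--         if len(lines) == 1:
--             line = lines[0]
--             d = -int(line[1:]) if line[0] == "L" else int(line[1:])
--             return ((1 if (start + d) % 100 == 0 else 0), d)
--         mid = len(lines) // 2
--         c1, s1 = solve(lines[:mid], start)
--         c2, s2 = solve(lines[mid:], start + s1)
--         return (c1 + c2, s1 + s2)
--     return solve(inp, 50)[0]
-- ===== Notes on version B (the rewrite author's own statement) =====
-- stated objective: alternative
-- what changed: A is a single left-to-right stateful scan; B is divide-and-conquer: it splits the line list in half, each recursive call returns a pair (count of multiples-of-100 positions, total displacement of that segment), and the right half is solved with its start offset by the left half's displacement.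
import Mathlib
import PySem

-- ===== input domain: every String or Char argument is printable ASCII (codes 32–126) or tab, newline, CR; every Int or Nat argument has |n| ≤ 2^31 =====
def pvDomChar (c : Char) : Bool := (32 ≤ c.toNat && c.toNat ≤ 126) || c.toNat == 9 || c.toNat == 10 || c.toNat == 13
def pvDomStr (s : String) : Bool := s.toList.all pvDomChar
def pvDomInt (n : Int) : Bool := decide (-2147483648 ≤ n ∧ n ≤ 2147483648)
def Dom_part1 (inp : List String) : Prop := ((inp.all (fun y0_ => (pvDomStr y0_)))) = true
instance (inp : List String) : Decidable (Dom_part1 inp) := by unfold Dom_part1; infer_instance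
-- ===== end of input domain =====

-- B re-implements A by a different algorithm: divide and conquer on the line list; each
-- call returns (count of multiples-of-100 positions, total displacement) of its segment.

-- ===== PORT A =====
-- single fold carrying (ct, sum); on a line Python would raise on (empty line or
-- unparsable int) the state is left unchanged — such inputs are outside Pre_part1.
def part1 (inp : List String) : Int :=
  (inp.foldl (fun (st : Int × Int) line =>
      match PySem.Str.pyGet? line 0, PySem.Int.ofStr? (PySem.Str.slice line (some 1) none) with
      | some first, some rest =>
        let ct := if first = 'L' then st.1 - rest else st.1 + rest
        (ct, if PySem.Int.mod ct 100 = 0 then st.2 + 1 else st.2)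
      | _, _ => st
    ) (50, 0)).2

-- ===== PORT B =====
-- Source B's signed delta of one line (total here; empty/unparsable lines are outside Pre_).
def deltaB (line : String) : Int :=
  if PySem.Str.pyGet? line 0 = some 'L' then
    -((PySem.Int.ofStr? (PySem.Str.slice line (some 1) none)).getD 0)
  else
    (PySem.Int.ofStr? (PySem.Str.slice line (some 1) none)).getD 0

-- Source B's solve: divide and conquer; lines[:mid] / lines[mid:] are List.take / List.drop.
def solveB (lines : List String) (start : Int) : Int × Int :=
  if h0 : lines = [] then (0, 0)
  else if h1 : lines.length = 1 then
    let d := deltaB (lines.headD "")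
    ((if PySem.Int.mod (start + d) 100 = 0 then 1 else 0), d)
  else
    let mid := lines.length / 2
    let p1 := solveB (lines.take mid) start
    let p2 := solveB (lines.drop mid) (start + p1.2)
    (p1.1 + p2.1, p1.2 + p2.2)
termination_by lines.length
decreasing_by
  · have hn : lines.length ≠ 0 := fun h => h0 (List.eq_nil_of_length_eq_zero h)
    simp only [List.length_take]
    omega
  · have hn : lines.length ≠ 0 := fun h => h0 (List.eq_nil_of_length_eq_zero h)
    simp only [List.length_drop]
    omega

def part1_alt (inp : List String) : Int := (solveB inp 50).1

-- ===== PRECONDITION & SPEC =====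
-- Pre_ excludes exactly the inputs on which A raises: an empty line (IndexError on
-- line[0]) or a line whose tail is not a valid int literal (ValueError).
def Pre_part1 (inp : List String) : Prop :=
  ∀ line ∈ inp, line.toList ≠ [] ∧
    (PySem.Int.ofStr? (PySem.Str.slice line (some 1) none)).isSome = true
instance (inp : List String) : Decidable (Pre_part1 inp) := by unfold Pre_part1; infer_instance
def pvWitness_part1 : List String := ["L100", "L100", "R123", "L  5", "L  5"]
def Spec_part1 (inp : List String) (out : Int) : Prop := out = part1_alt inp
instance (inp : List String) (out : Int) : Decidable (Spec_part1 inp out) := by unfold Spec_part1; infer_instance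

-- ===== CLAIM (what is proved, stated in full; the proofs are below) =====
def Claim_equal_part1 : Prop := ∀ (inp : List String), Dom_part1 inp → Pre_part1 inp → Spec_part1 inp (part1 inp)

-- ===== LEMMAS AND PROOFS =====

/-- A's loop body, named for the proofs. -/
def stepA (st : Int × Int) (line : String) : Int × Int :=
  match PySem.Str.pyGet? line 0, PySem.Int.ofStr? (PySem.Str.slice line (some 1) none) with
  | some first, some rest =>
    let ct := if first = 'L' then st.1 - rest else st.1 + rest
    (ct, if PySem.Int.mod ct 100 = 0 then st.2 + 1 else st.2)
  | _, _ => st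

lemma part1_eq (inp : List String) : part1 inp = (inp.foldl stepA (50, 0)).2 := rfl

/-- running positions after the start: `tailAcc ct ds` = positions reached from `ct`. -/
def tailAcc (ct : Int) : List Int → List Int
  | [] => []
  | d :: ds => (ct + d) :: tailAcc (ct + d) ds

/-- the common specification both programs are reduced to. -/
def countMul (ct : Int) (ds : List Int) : Int :=
  (((tailAcc ct ds).filter (fun p => PySem.Int.mod p 100 = 0)).length : Int)

lemma tailAcc_append (l1 l2 : List Int) : ∀ ct,
    tailAcc ct (l1 ++ l2) = tailAcc ct l1 ++ tailAcc (ct + l1.sum) l2 := by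
  induction l1 with
  | nil => intro ct; simp [tailAcc]
  | cons d ds ih =>
    intro ct
    simp only [List.cons_append, tailAcc, ih (ct + d), List.sum_cons]
    rw [add_assoc]

lemma countMul_append (ct : Int) (l1 l2 : List Int) :
    countMul ct (l1 ++ l2) = countMul ct l1 + countMul (ct + l1.sum) l2 := by
  simp [countMul, tailAcc_append]

/-- `solveB` computes the common spec together with the total displacement. -/
lemma solveB_spec_aux : ∀ (n : Nat) (lines : List String), lines.length ≤ n → ∀ start,
    solveB lines start = (countMul start (lines.map deltaB), (lines.map deltaB).sum) := by
  intro n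
  induction n with
  | zero =>
    intro lines hl start
    have h0 : lines = [] := List.eq_nil_of_length_eq_zero (Nat.le_zero.mp hl)
    subst h0
    rw [solveB]
    simp [countMul, tailAcc]
  | succ n ih =>
    intro lines hl start
    rw [solveB.eq_def]
    split_ifs with h0 h1
    · subst h0; simp [countMul, tailAcc]
    · obtain ⟨line, hl1⟩ : ∃ l, lines = [l] := by
        cases lines with
        | nil => exact absurd rfl h0
        | cons a t =>
          cases t with
          | nil => exact ⟨a, rfl⟩
          | cons b t' => simp at h1
      subst hl1
      by_cases hm : (100 : Int) ∣ (start + deltaB line) <;>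
        simp [countMul, tailAcc, hm]
    · have h2 : 2 ≤ lines.length := by
        have : lines.length ≠ 0 := fun h => h0 (List.eq_nil_of_length_eq_zero h)
        omega
      have e1 := ih (lines.take (lines.length / 2)) (by simp; omega) start
      have e2 := ih (lines.drop (lines.length / 2)) (by simp; omega)
        (start + (solveB (lines.take (lines.length / 2)) start).2)
      have hmap : (lines.take (lines.length / 2)).map deltaB ++
          (lines.drop (lines.length / 2)).map deltaB = lines.map deltaB := by
        rw [← List.map_append, List.take_append_drop]
      rw [e1] at e2
      simp only [e1, e2]
      rw [Prod.mk.injEq]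
      constructor
      · rw [← hmap, countMul_append]
      · rw [← hmap, List.sum_append]

lemma solveB_spec (lines : List String) (start : Int) :
    solveB lines start = (countMul start (lines.map deltaB), (lines.map deltaB).sum) :=
  solveB_spec_aux lines.length lines le_rfl start

lemma stepA_eq (line : String) (ct s : Int)
    (hne : line.toList ≠ [])
    (hsome : (PySem.Int.ofStr? (PySem.Str.slice line (some 1) none)).isSome = true) :
    stepA (ct, s) line
      = (ct + deltaB line, if PySem.Int.mod (ct + deltaB line) 100 = 0 then s + 1 else s) := by
  obtain ⟨v, hv⟩ := Option.isSome_iff_exists.mp hsome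
  obtain ⟨c, cs, hl⟩ : ∃ c cs, line.toList = c :: cs := by
    cases hlist : line.toList with
    | nil => exact absurd hlist hne
    | cons c cs => exact ⟨c, cs, rfl⟩
  have hget' : PySem.List.pyGet? line.toList 0 = some c := by
    rw [hl]; simp [PySem.List.pyGet?, PySem.List.pyIdx?]
  by_cases hc : c = 'L' <;>
    simp [stepA, deltaB, hget', hv, hc, sub_eq_add_neg]

lemma main_fold (lines : List String)
    (h : ∀ line ∈ lines, line.toList ≠ [] ∧
      (PySem.Int.ofStr? (PySem.Str.slice line (some 1) none)).isSome = true) :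
    ∀ (ct s : Int),
    (lines.foldl stepA (ct, s)).2 = s + countMul ct (lines.map deltaB) := by
  induction lines with
  | nil => intro ct s; simp [countMul, tailAcc]
  | cons line rest ih =>
    intro ct s
    obtain ⟨hne, hsome⟩ := h line (by simp)
    have ihr := ih (fun l hm => h l (by simp [hm]))
    rw [List.foldl_cons, stepA_eq line ct s hne hsome, List.map_cons]
    by_cases hm : PySem.Int.mod (ct + deltaB line) 100 = 0 <;>
      simp only [hm, if_pos, if_neg, countMul, tailAcc, List.filter_cons, ihr,
        decide_eq_true_eq, not_false_eq_true, List.length_cons] <;>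
      push_cast <;> ring

-- ===== VERDICT (by name: the statement is the Claim_ definition above) =====
theorem part1_spec : Claim_equal_part1 := by
  intro inp _ hpre
  unfold Spec_part1 part1_alt
  rw [part1_eq, solveB_spec, main_fold inp hpre 50 0]
  simp
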